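-- pv_equiv track=rewrite | github.com/florrocio17/Ejercicios-Algoritmia | tp_truco_v3.py | calcular_envido
-- ===== SOURCE A (Python) =====
-- def calcular_envido(cartas_jugadores, n):
--     envidos_jugadores = []
--     envido = 0
--     for f in range(len(cartas_jugadores)):
--         if cartas_jugadores[f][0][1] != cartas_jugadores[f][1][1] and cartas_jugadores[f][1][1] != cartas_jugadores[f][2][1] and cartas_jugadores[f][0][1] != cartas_jugadores[f][2][1]:
--             lista = [cartas_jugadores[f][0][0], cartas_jugadores[f]
--                      [1][0], cartas_jugadores[f][2][0]]
--             for j in range(len(lista)):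
--                 if lista[j] in [10, 11, 12]:
--                     lista[j] = 0
--             envido = max(lista)
--             envidos_jugadores.append(envido)
--
--         elif (cartas_jugadores[f][0][1] == cartas_jugadores[f][1][1] and cartas_jugadores[f][1][1] != cartas_jugadores[f][2][1]) or (cartas_jugadores[f][0][1] == cartas_jugadores[f][2][1] and cartas_jugadores[f][2][1] != cartas_jugadores[f][1][1]) or (cartas_jugadores[f][1][1] == cartas_jugadores[f][2][1] and cartas_jugadores[f][2][1] != cartas_jugadores[f][0][1]):
--             if cartas_jugadores[f][0][1] == cartas_jugadores[f][1][1]: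
--                 if cartas_jugadores[f][0][0] in [10, 11, 12] and cartas_jugadores[f][1][0] not in [10, 11, 12]:
--                     envido = 20 + cartas_jugadores[f][1][0]
--                     envidos_jugadores.append(envido)
--                 elif cartas_jugadores[f][0][0] not in [10, 11, 12] and cartas_jugadores[f][1][0] in [10, 11, 12]:
--                     envido = 20 + cartas_jugadores[f][0][0]
--                     envidos_jugadores.append(envido)
--                 elif cartas_jugadores[f][0][0] in [10, 11, 12] and cartas_jugadores[f][1][0] in [10, 11, 12]:
--                     envido = 20
--                     envidos_jugadores.append(envido)
--                 else:
--                     envido = 20 + \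
--                         cartas_jugadores[f][0][0] + cartas_jugadores[f][1][0]
--                     envidos_jugadores.append(envido)
--             if cartas_jugadores[f][0][1] == cartas_jugadores[f][2][1]:
--                 if cartas_jugadores[f][0][0] in [10, 11, 12] and cartas_jugadores[f][2][0] not in [10, 11, 12]:
--                     envido = 20 + cartas_jugadores[f][2][0]
--                     envidos_jugadores.append(envido)
--                 elif cartas_jugadores[f][0][0] not in [10, 11, 12] and cartas_jugadores[f][2][0] in [10, 11, 12]:
--                     envido = 20 + cartas_jugadores[f][0][0]
--                     envidos_jugadores.append(envido)
--                 elif cartas_jugadores[f][0][0] in [10, 11, 12] and cartas_jugadores[f][2][0] in [10, 11, 12]: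
--                     envido = 20
--                     envidos_jugadores.append(envido)
--                 else:
--                     envido = 20 + \
--                         cartas_jugadores[f][0][0] + cartas_jugadores[f][2][0]
--                     envidos_jugadores.append(envido)
--             if cartas_jugadores[f][1][1] == cartas_jugadores[f][2][1]:
--                 if cartas_jugadores[f][1][0] in [10, 11, 12] and cartas_jugadores[f][2][0] not in [10, 11, 12]:
--                     envido = 20 + cartas_jugadores[f][2][0]
--                     envidos_jugadores.append(envido)
--                 elif cartas_jugadores[f][1][0] not in [10, 11, 12] and cartas_jugadores[f][2][0] in [10, 11, 12]:
--                     envido = 20 + cartas_jugadores[f][1][0]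
--                     envidos_jugadores.append(envido)
--                 elif cartas_jugadores[f][1][0] in [10, 11, 12] and cartas_jugadores[f][2][0] in [10, 11, 12]:
--                     envido = 20
--                     envidos_jugadores.append(envido)
--                 else:
--                     envido = 20 + \
--                         cartas_jugadores[f][1][0] + cartas_jugadores[f][2][0]
--                     envidos_jugadores.append(envido)
--         else:
--             lista = [cartas_jugadores[f][0][0], cartas_jugadores[f]
--                      [1][0], cartas_jugadores[f][2][0]]
--             for j in range(len(lista)):
--                 if lista[j] in [10, 11, 12]:
--                     lista[j] = 0
--             envido = 20
--             for i in range(len(lista)):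
--                 envido = envido+lista[i]
--             envidos_jugadores.append(envido)
--     return envidos_jugadores
-- ===== SOURCE B (Python) =====
-- def calcular_envido(cartas_jugadores, n):
--     resultados = []
--     for mano in cartas_jugadores:
--         grupos = {}
--         for carta in mano[:3]:
--             valor = 0 if carta[0] in (10, 11, 12) else carta[0]
--             grupos[carta[1]] = grupos.get(carta[1], []) + [valor]
--         combinado = next((20 + sum(vs) for vs in grupos.values() if len(vs) >= 2), None)
--         if combinado is None:
--             combinado = max(vs[0] for vs in grupos.values())
--         resultados.append(combinado)
--     return resultados
-- ===== Notes on version B (the rewrite author's own statement) =====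
-- stated objective: simpler
-- what changed: B replaces A's hand-written three-way suit-pattern branch tree (with the pair block copied out three times) by grouping each hand's first three cards by suit into a dict of point-values and scoring 20+sum of the multi-card group, else the max single value.
import Mathlib
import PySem

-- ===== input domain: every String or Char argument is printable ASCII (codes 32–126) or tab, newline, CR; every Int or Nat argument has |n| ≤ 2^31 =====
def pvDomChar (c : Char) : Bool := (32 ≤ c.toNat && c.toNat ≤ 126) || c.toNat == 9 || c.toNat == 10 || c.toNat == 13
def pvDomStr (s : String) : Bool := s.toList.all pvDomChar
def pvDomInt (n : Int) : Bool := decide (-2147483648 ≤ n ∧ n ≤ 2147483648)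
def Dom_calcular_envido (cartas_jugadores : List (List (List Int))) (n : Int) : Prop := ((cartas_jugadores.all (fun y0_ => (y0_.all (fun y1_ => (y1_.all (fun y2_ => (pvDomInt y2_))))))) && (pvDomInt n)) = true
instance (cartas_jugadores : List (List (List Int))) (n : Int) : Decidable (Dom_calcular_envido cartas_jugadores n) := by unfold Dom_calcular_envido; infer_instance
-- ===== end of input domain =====

-- B replaces A's hand-written three-way suit-pattern case analysis by grouping each
-- hand's first three cards by suit into a dict of point-values (objective: simpler).

-- ===== PORT A =====
-- cartas_jugadores[f][i][k]; inside Pre_ every such access is in range, so the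
-- `.getD` defaults are never consulted (Python raises IndexError outside Pre_).
def pvCardA (h : List (List Int)) (i k : Int) : Int :=
  (PySem.List.pyGet? ((PySem.List.pyGet? h i).getD []) k).getD 0

-- the inner `if lista[j] in [10,11,12]: lista[j] = 0` rewrite of one entry
def pvZeroFace (m : Int) : Int := if m = 10 ∨ m = 11 ∨ m = 12 then 0 else m

-- the repeated 4-branch pair block A writes out three times (same code, different indices)
def pvPairA (x y : Int) : Int :=
  if (x = 10 ∨ x = 11 ∨ x = 12) ∧ ¬(y = 10 ∨ y = 11 ∨ y = 12) then 20 + y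
  else if ¬(x = 10 ∨ x = 11 ∨ x = 12) ∧ (y = 10 ∨ y = 11 ∨ y = 12) then 20 + x
  else if (x = 10 ∨ x = 11 ∨ x = 12) ∧ (y = 10 ∨ y = 11 ∨ y = 12) then 20
  else 20 + x + y

-- the values appended during one iteration f of A's outer loop
def pvHandA (h : List (List Int)) : List Int :=
  if pvCardA h 0 1 ≠ pvCardA h 1 1 ∧ pvCardA h 1 1 ≠ pvCardA h 2 1 ∧ pvCardA h 0 1 ≠ pvCardA h 2 1 then
    let lista := [pvCardA h 0 0, pvCardA h 1 0, pvCardA h 2 0].map pvZeroFace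
    [(PySem.List.max? lista (fun y => y)).getD 0]
  else if (pvCardA h 0 1 = pvCardA h 1 1 ∧ pvCardA h 1 1 ≠ pvCardA h 2 1) ∨
          (pvCardA h 0 1 = pvCardA h 2 1 ∧ pvCardA h 2 1 ≠ pvCardA h 1 1) ∨
          (pvCardA h 1 1 = pvCardA h 2 1 ∧ pvCardA h 2 1 ≠ pvCardA h 0 1) then
    (if pvCardA h 0 1 = pvCardA h 1 1 then [pvPairA (pvCardA h 0 0) (pvCardA h 1 0)] else []) ++
    (if pvCardA h 0 1 = pvCardA h 2 1 then [pvPairA (pvCardA h 0 0) (pvCardA h 2 0)] else []) ++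
    (if pvCardA h 1 1 = pvCardA h 2 1 then [pvPairA (pvCardA h 1 0) (pvCardA h 2 0)] else [])
  else
    let lista := [pvCardA h 0 0, pvCardA h 1 0, pvCardA h 2 0].map pvZeroFace
    [lista.foldl (· + ·) 20]

def calcular_envido (cartas_jugadores : List (List (List Int))) (n : Int) : List Int :=
  cartas_jugadores.foldl (fun acc h => acc ++ pvHandA h) []

-- ===== PORT B =====
-- one hand of Source B: group the first three cards by suit, then score the groups
def pvHandB (mano : List (List Int)) : Int :=
  let grupos := (PySem.List.slice mano none (some 3)).foldl
    (fun (d : PySem.Dict Int (List Int)) carta =>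
      let num := (PySem.List.pyGet? carta 0).getD 0
      let valor := if num = 10 ∨ num = 11 ∨ num = 12 then 0 else num
      let palo := (PySem.List.pyGet? carta 1).getD 0
      d.insert palo (d.getD palo [] ++ [valor])) PySem.Dict.empty
  match grupos.values.filter (fun vs => 2 ≤ vs.length) with
  | vs :: _ => 20 + vs.sum
  | [] => (PySem.List.max? (grupos.values.map (fun vs => (PySem.List.pyGet? vs 0).getD 0)) (fun y => y)).getD 0

def calcular_envido_alt (cartas_jugadores : List (List (List Int))) (n : Int) : List Int :=
  cartas_jugadores.foldl (fun res mano => res ++ [pvHandB mano]) []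

-- ===== PRECONDITION & SPEC =====
-- A indexes the first three cards of every hand and the first two fields of each of
-- those cards; outside that shape Python raises IndexError, so Pre_ excludes it.
def Pre_calcular_envido (cartas_jugadores : List (List (List Int))) (n : Int) : Prop :=
  ∀ mano ∈ cartas_jugadores, 3 ≤ mano.length ∧ ∀ c ∈ mano.take 3, 2 ≤ c.length
instance (cartas_jugadores : List (List (List Int))) (n : Int) : Decidable (Pre_calcular_envido cartas_jugadores n) := by unfold Pre_calcular_envido; infer_instance

def pvWitness_calcular_envido : List (List (List Int)) × Int :=
  ([[[7, 1], [6, 1], [12, 2]], [[1, 0], [2, 1], [3, 2]]], 0)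

def Spec_calcular_envido (cartas_jugadores : List (List (List Int))) (n : Int) (out : List Int) : Prop := out = calcular_envido_alt cartas_jugadores n
instance (cartas_jugadores : List (List (List Int))) (n : Int) (out : List Int) : Decidable (Spec_calcular_envido cartas_jugadores n out) := by unfold Spec_calcular_envido; infer_instance

-- ===== CLAIM (what is proved, stated in full; the proofs are below) =====
def Claim_equal_calcular_envido : Prop := ∀ (cartas_jugadores : List (List (List Int))) (n : Int), Dom_calcular_envido cartas_jugadores n → Pre_calcular_envido cartas_jugadores n → Spec_calcular_envido cartas_jugadores n (calcular_envido cartas_jugadores n)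

-- ===== LEMMAS AND PROOFS =====

theorem pvPairA_eq (x y : Int) : pvPairA x y = 20 + pvZeroFace x + pvZeroFace y := by
  unfold pvPairA pvZeroFace; split_ifs <;> omega

theorem pvHandB_all (x0 p0 x1 p1 x2 p2 : Int) (t0 t1 t2 : List Int) (r : List (List Int))
    (h01 : p0 = p1) (h02 : p0 = p2) :
    pvHandB ((x0::p0::t0)::(x1::p1::t1)::(x2::p2::t2)::r) =
      20 + (pvZeroFace x0 + (pvZeroFace x1 + (pvZeroFace x2 + 0))) := by
  subst h01 h02
  simp [pvHandB, pvZeroFace, PySem.List.slice, PySem.List.clampIdx, PySem.List.pyGet?, PySem.List.pyIdx?,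
    PySem.Dict.insert, PySem.Dict.getD, PySem.Dict.get?, PySem.Dict.contains, PySem.Dict.empty,
    PySem.Dict.values]

theorem pvHandB_p01 (x0 p0 x1 p1 x2 p2 : Int) (t0 t1 t2 : List Int) (r : List (List Int))
    (h01 : p0 = p1) (h02 : p0 ≠ p2) :
    pvHandB ((x0::p0::t0)::(x1::p1::t1)::(x2::p2::t2)::r) =
      20 + (pvZeroFace x0 + (pvZeroFace x1 + 0)) := by
  subst h01
  simp [pvHandB, pvZeroFace, PySem.List.slice, PySem.List.clampIdx, PySem.List.pyGet?, PySem.List.pyIdx?,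
    PySem.Dict.insert, PySem.Dict.getD, PySem.Dict.get?, PySem.Dict.contains, PySem.Dict.empty,
    PySem.Dict.values, h02]

theorem pvHandB_p02 (x0 p0 x1 p1 x2 p2 : Int) (t0 t1 t2 : List Int) (r : List (List Int))
    (h02 : p0 = p2) (h01 : p0 ≠ p1) :
    pvHandB ((x0::p0::t0)::(x1::p1::t1)::(x2::p2::t2)::r) =
      20 + (pvZeroFace x0 + (pvZeroFace x2 + 0)) := by
  subst h02
  simp [pvHandB, pvZeroFace, PySem.List.slice, PySem.List.clampIdx, PySem.List.pyGet?, PySem.List.pyIdx?,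
    PySem.Dict.insert, PySem.Dict.getD, PySem.Dict.get?, PySem.Dict.contains, PySem.Dict.empty,
    PySem.Dict.values, h01]

theorem pvHandB_p12 (x0 p0 x1 p1 x2 p2 : Int) (t0 t1 t2 : List Int) (r : List (List Int))
    (h12 : p1 = p2) (h01 : p0 ≠ p1) :
    pvHandB ((x0::p0::t0)::(x1::p1::t1)::(x2::p2::t2)::r) =
      20 + (pvZeroFace x1 + (pvZeroFace x2 + 0)) := by
  subst h12
  simp [pvHandB, pvZeroFace, PySem.List.slice, PySem.List.clampIdx, PySem.List.pyGet?, PySem.List.pyIdx?,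
    PySem.Dict.insert, PySem.Dict.getD, PySem.Dict.get?, PySem.Dict.contains, PySem.Dict.empty,
    PySem.Dict.values, h01, (Ne.symm h01)]

theorem pvHandB_dist (x0 p0 x1 p1 x2 p2 : Int) (t0 t1 t2 : List Int) (r : List (List Int))
    (h01 : p0 ≠ p1) (h02 : p0 ≠ p2) (h12 : p1 ≠ p2) :
    pvHandB ((x0::p0::t0)::(x1::p1::t1)::(x2::p2::t2)::r) =
      (PySem.List.max? [pvZeroFace x0, pvZeroFace x1, pvZeroFace x2] (fun y => y)).getD 0 := by
  simp [pvHandB, pvZeroFace, PySem.List.slice, PySem.List.clampIdx, PySem.List.pyGet?, PySem.List.pyIdx?,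
    PySem.Dict.insert, PySem.Dict.getD, PySem.Dict.get?, PySem.Dict.contains, PySem.Dict.empty,
    PySem.Dict.values, PySem.List.max?, h01, h02, h12]

theorem pvHandA_expand (x0 p0 x1 p1 x2 p2 : Int) (t0 t1 t2 : List Int) (r : List (List Int)) :
    pvHandA ((x0::p0::t0)::(x1::p1::t1)::(x2::p2::t2)::r) =
      (if p0 ≠ p1 ∧ p1 ≠ p2 ∧ p0 ≠ p2 then
        [(PySem.List.max? [pvZeroFace x0, pvZeroFace x1, pvZeroFace x2] (fun y => y)).getD 0]
      else if (p0 = p1 ∧ p1 ≠ p2) ∨ (p0 = p2 ∧ p2 ≠ p1) ∨ (p1 = p2 ∧ p2 ≠ p0) then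
        (if p0 = p1 then [pvPairA x0 x1] else []) ++
        (if p0 = p2 then [pvPairA x0 x2] else []) ++
        (if p1 = p2 then [pvPairA x1 x2] else [])
      else [[pvZeroFace x0, pvZeroFace x1, pvZeroFace x2].foldl (· + ·) 20]) := by
  have ha : ∀ m : Nat, (0:Int) ≤ (m:Int) + 1 := by intro m; omega
  have hb : ∀ m : Nat, (2:Int) ≤ (m:Int) + 1 + 1 := by intro m; omega
  have hcc : ∀ m : Nat, (0:Int) ≤ (m:Int) + 1 + 1 := by intro m; omega
  have e00 : pvCardA ((x0::p0::t0)::(x1::p1::t1)::(x2::p2::t2)::r) 0 0 = x0 := by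
    simp [pvCardA, PySem.List.pyGet?, PySem.List.pyIdx?, ha, hb, hcc]
  have e01 : pvCardA ((x0::p0::t0)::(x1::p1::t1)::(x2::p2::t2)::r) 0 1 = p0 := by
    simp [pvCardA, PySem.List.pyGet?, PySem.List.pyIdx?, ha, hb, hcc]
  have e10 : pvCardA ((x0::p0::t0)::(x1::p1::t1)::(x2::p2::t2)::r) 1 0 = x1 := by
    simp [pvCardA, PySem.List.pyGet?, PySem.List.pyIdx?, ha, hb, hcc]
  have e11 : pvCardA ((x0::p0::t0)::(x1::p1::t1)::(x2::p2::t2)::r) 1 1 = p1 := by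
    simp [pvCardA, PySem.List.pyGet?, PySem.List.pyIdx?, ha, hb, hcc]
  have e20 : pvCardA ((x0::p0::t0)::(x1::p1::t1)::(x2::p2::t2)::r) 2 0 = x2 := by
    simp [pvCardA, PySem.List.pyGet?, PySem.List.pyIdx?, ha, hb, hcc]
  have e21 : pvCardA ((x0::p0::t0)::(x1::p1::t1)::(x2::p2::t2)::r) 2 1 = p2 := by
    simp [pvCardA, PySem.List.pyGet?, PySem.List.pyIdx?, ha, hb, hcc]
  simp only [pvHandA, e00, e01, e10, e11, e20, e21, List.map]

theorem pvHand_eq (mano : List (List Int)) (h3 : 3 ≤ mano.length)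
    (hc : ∀ c ∈ mano.take 3, 2 ≤ c.length) : pvHandA mano = [pvHandB mano] := by
  obtain ⟨c0, c1, c2, rest, rfl⟩ : ∃ a b c r, mano = a::b::c::r := by
    match mano, h3 with | a::b::c::r, _ => exact ⟨a,b,c,r,rfl⟩
  obtain ⟨x0,p0,t0,rfl⟩ : ∃ x p t, c0 = x::p::t := by
    have := hc c0 (by simp); match c0, this with | x::p::t,_ => exact ⟨x,p,t,rfl⟩
  obtain ⟨x1,p1,t1,rfl⟩ : ∃ x p t, c1 = x::p::t := by
    have := hc c1 (by simp); match c1, this with | x::p::t,_ => exact ⟨x,p,t,rfl⟩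
  obtain ⟨x2,p2,t2,rfl⟩ : ∃ x p t, c2 = x::p::t := by
    have := hc c2 (by simp); match c2, this with | x::p::t,_ => exact ⟨x,p,t,rfl⟩
  rw [pvHandA_expand]
  by_cases h01 : p0 = p1 <;> by_cases h02 : p0 = p2 <;> by_cases h12 : p1 = p2 <;> try omega
  · rw [pvHandB_all x0 p0 x1 p1 x2 p2 t0 t1 t2 rest h01 h02]
    simp only [h01, h02, List.foldl]
    simp only [List.cons.injEq, and_true, if_neg, if_pos]
    split_ifs <;> simp_all <;> ring
  · rw [pvHandB_p01 x0 p0 x1 p1 x2 p2 t0 t1 t2 rest h01 h02]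
    have h12' : p1 ≠ p2 := by omega
    simp [h01, h02, h12', pvPairA_eq]; ring
  · rw [pvHandB_p02 x0 p0 x1 p1 x2 p2 t0 t1 t2 rest h02 h01]
    have h12' : p2 ≠ p1 := by omega
    simp [h01, h02, h12', h12'.symm, pvPairA_eq]
    ring
  · rw [pvHandB_p12 x0 p0 x1 p1 x2 p2 t0 t1 t2 rest h12 h01]
    have h20 : p2 ≠ p0 := fun e => h02 e.symm
    simp [h01, h02, h12, h20, pvPairA_eq]
    ring
  · rw [pvHandB_dist x0 p0 x1 p1 x2 p2 t0 t1 t2 rest h01 h02 h12]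
    simp [h01, h02, h12]

theorem pvFold_eq (cj : List (List (List Int))) (acc : List Int)
    (h : ∀ mano ∈ cj, 3 ≤ mano.length ∧ ∀ c ∈ mano.take 3, 2 ≤ c.length) :
    cj.foldl (fun acc h => acc ++ pvHandA h) acc
      = cj.foldl (fun res mano => res ++ [pvHandB mano]) acc := by
  induction cj generalizing acc with
  | nil => rfl
  | cons m t ih =>
    simp only [List.foldl_cons]
    rw [pvHand_eq m (h m (by simp)).1 (h m (by simp)).2]
    exact ih _ (fun x hx => h x (by simp [hx]))

-- ===== VERDICT (by name: the statement is the Claim_ definition above) =====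
theorem calcular_envido_spec : Claim_equal_calcular_envido := by
  intro cj n _ hpre
  unfold Spec_calcular_envido calcular_envido calcular_envido_alt
  exact pvFold_eq cj [] hpre
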